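-- pv_equiv track=rewrite | github.com/suryaatevellore/CSC791_2019 | adjacency_matrix.py | host_mapping
-- ===== SOURCE A (Python) =====
-- def host_mapping(connections, bridges_list=None, number_of_tenants=1):
--     # hostname, localport, bridge_id
--     hosts_ports = []
--     index = 0
--     number_of_bridges = len(bridges_list)
--     for entry in connections:
--         if entry[0][0] == 'H':
--             hosts_ports.append((entry[0], entry[2], bridges_list[index]))
--             index += 1
--             if index == (number_of_bridges):
--                 index = 0
--
--     return hosts_ports
-- ===== SOURCE B (Python) =====
-- def host_mapping(connections, bridges_list=None, number_of_tenants=1):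
--     # hostname, localport, bridge_id
--     hosts = [e for e in connections if e[0][0] == 'H']
--     n = len(bridges_list)
--     reps = (len(hosts) + n - 1) // n if hosts else 0
--     return [(h, p, b) for (h, _, p), b in zip(hosts, bridges_list * reps)]
-- ===== Notes on version B (the rewrite author's own statement) =====
-- stated objective: alternative
-- what changed: Instead of walking the connections with a manually wrapping bridge-index counter, B first filters the host entries, then materialises the whole bridge sequence at once by tiling bridges_list (list repetition to ceil(len(hosts)/n) copies) and pairs hosts with bridges via zip; no per-element index bookkeeping or modulo remains.
import Mathlib
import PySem

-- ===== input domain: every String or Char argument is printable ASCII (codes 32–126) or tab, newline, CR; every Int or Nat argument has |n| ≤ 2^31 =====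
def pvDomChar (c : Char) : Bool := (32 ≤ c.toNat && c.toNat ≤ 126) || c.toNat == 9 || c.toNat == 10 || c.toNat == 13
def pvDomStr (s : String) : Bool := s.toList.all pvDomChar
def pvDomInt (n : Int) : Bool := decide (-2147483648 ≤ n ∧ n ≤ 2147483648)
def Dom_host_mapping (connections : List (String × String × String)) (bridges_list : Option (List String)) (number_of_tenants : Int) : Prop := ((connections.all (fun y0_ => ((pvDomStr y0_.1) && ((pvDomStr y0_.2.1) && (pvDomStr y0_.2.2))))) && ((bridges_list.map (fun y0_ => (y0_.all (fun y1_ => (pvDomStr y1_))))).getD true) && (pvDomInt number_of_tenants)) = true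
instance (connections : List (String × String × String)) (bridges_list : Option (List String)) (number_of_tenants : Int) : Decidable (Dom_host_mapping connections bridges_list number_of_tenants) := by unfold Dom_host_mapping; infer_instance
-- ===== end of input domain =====

-- B replaces A's walk with a manually wrapping bridge-index counter by two staged passes:
-- filter the host entries, tile bridges_list to ceil(len(hosts)/n) copies, and zip
-- hosts with the tiled bridge sequence (alternative decomposition; same cost).

-- ===== PORT A =====
def host_mapping (connections : List (String × String × String)) (bridges_list : Option (List String)) (number_of_tenants : Int) : List (String × String × String) :=
  let bs := bridges_list.getD []
  let number_of_bridges := bs.length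
  let r := connections.foldl (fun (st : List (String × String × String) × Nat) entry =>
    if PySem.Str.pyGet? entry.1 0 = some 'H' then
      let hosts_ports := st.1 ++ [(entry.1, entry.2.2, PySem.List.pyGetD bs (Int.ofNat st.2) "")]
      let index := st.2 + 1
      if index = number_of_bridges then (hosts_ports, 0) else (hosts_ports, index)
    else st) ([], 0)
  r.1

-- ===== PORT B =====
-- Source B: filter hosts; reps = ceil division (len(hosts)+n-1)//n (0 if no hosts);
-- bridges_list * reps is (List.replicate reps bs).flatten (negative reps → empty, via toNat);
-- zip hosts with the tiled list and project.
def host_mapping_alt (connections : List (String × String × String)) (bridges_list : Option (List String)) (number_of_tenants : Int) : List (String × String × String) :=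
  let bs := bridges_list.getD []
  let hosts := connections.filter (fun e => PySem.Str.pyGet? e.1 0 == some 'H')
  let n : Int := Int.ofNat bs.length
  let reps : Int := if hosts ≠ [] then PySem.Int.floordiv (Int.ofNat hosts.length + n - 1) n else 0
  (hosts.zip ((List.replicate reps.toNat bs).flatten)).map (fun p => (p.1.1, p.1.2.2, p.2))

-- ===== PRECONDITION & SPEC =====
-- Pre_ excludes exactly the inputs where the Python A raises: bridges_list=None
-- (TypeError at len), an entry with empty first component (IndexError at entry[0][0]),
-- and an empty bridges_list together with at least one host entry (IndexError at
-- bridges_list[0]).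
def Pre_host_mapping (connections : List (String × String × String)) (bridges_list : Option (List String)) (number_of_tenants : Int) : Prop :=
  bridges_list ≠ none ∧ (∀ e ∈ connections, e.1 ≠ "") ∧
    (bridges_list.getD [] ≠ [] ∨ ∀ e ∈ connections, ¬ (PySem.Str.pyGet? e.1 0 = some 'H'))
instance (connections : List (String × String × String)) (bridges_list : Option (List String)) (number_of_tenants : Int) : Decidable (Pre_host_mapping connections bridges_list number_of_tenants) := by unfold Pre_host_mapping; infer_instance
def pvWitness_host_mapping : (List (String × String × String)) × Option (List String) × Int :=
  ([("H1", "e1", "p1"), ("S1", "e2", "p2"), ("H2", "e3", "p3")], some ["br1", "br2"], 1)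
def Spec_host_mapping (connections : List (String × String × String)) (bridges_list : Option (List String)) (number_of_tenants : Int) (out : List (String × String × String)) : Prop := out = host_mapping_alt connections bridges_list number_of_tenants
instance (connections : List (String × String × String)) (bridges_list : Option (List String)) (number_of_tenants : Int) (out : List (String × String × String)) : Decidable (Spec_host_mapping connections bridges_list number_of_tenants out) := by unfold Spec_host_mapping; infer_instance

-- ===== CLAIM (what is proved, stated in full; the proofs are below) =====
def Claim_equal_host_mapping : Prop := ∀ (connections : List (String × String × String)) (bridges_list : Option (List String)) (number_of_tenants : Int), Dom_host_mapping connections bridges_list number_of_tenants → Pre_host_mapping connections bridges_list number_of_tenants → Spec_host_mapping connections bridges_list number_of_tenants (host_mapping connections bridges_list number_of_tenants)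

-- ===== LEMMAS AND PROOFS =====

-- A's loop body, abstracted over the bridge list.
def hmStep (bs : List String) (st : List (String × String × String) × Nat) (entry : String × String × String) : List (String × String × String) × Nat :=
  if PySem.Str.pyGet? entry.1 0 = some 'H' then
    let hosts_ports := st.1 ++ [(entry.1, entry.2.2, PySem.List.pyGetD bs (Int.ofNat st.2) "")]
    let index := st.2 + 1
    if index = bs.length then (hosts_ports, 0) else (hosts_ports, index)
  else st

lemma host_mapping_eq_fold (connections : List (String × String × String)) (bs : List String) (nt : Int) :
    host_mapping connections (some bs) nt = (connections.foldl (hmStep bs) ([], 0)).1 := rfl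

-- Loop invariant: starting from index k % |bs| the fold appends exactly the
-- enumerate-from-k map (mod |bs|) over the filtered host entries.
lemma hmStep_invariant (bs : List String) (hbs : bs ≠ []) :
    ∀ (conns : List (String × String × String)) (acc : List (String × String × String)) (k : Nat),
      (conns.foldl (hmStep bs) (acc, k % bs.length)).1 =
        acc ++ (PySem.List.enumerate (conns.filter (fun entry => PySem.Str.pyGet? entry.1 0 == some 'H')) (Int.ofNat k)).map
          (fun p => (p.2.1, p.2.2.2, PySem.List.pyGetD bs (PySem.Int.mod p.1 (Int.ofNat bs.length)) "")) := by
  intro conns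
  induction conns with
  | nil => intro acc k; simp [PySem.List.enumerate_nil]
  | cons e cs ih =>
    intro acc k
    have hlen : 0 < bs.length := List.length_pos_iff.mpr hbs
    by_cases he : PySem.Str.pyGet? e.1 0 = some 'H'
    · have hmod : (k % bs.length + 1) % bs.length =
        if k % bs.length + 1 = bs.length then 0 else k % bs.length + 1 := by
        split_ifs with h
        · rw [h, Nat.mod_self]
        · exact Nat.mod_eq_of_lt (by have := Nat.mod_lt k hlen; omega)
      have hstep : hmStep bs (acc, k % bs.length) e =
          (acc ++ [(e.1, e.2.2, PySem.List.pyGetD bs (Int.ofNat (k % bs.length)) "")], (k + 1) % bs.length) := by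
        simp only [hmStep, if_pos he]
        rw [(Nat.mod_add_mod k bs.length 1).symm, hmod]
        split_ifs <;> rfl
      have hfil : (e :: cs).filter (fun entry => PySem.Str.pyGet? entry.1 0 == some 'H') =
          e :: cs.filter (fun entry => PySem.Str.pyGet? entry.1 0 == some 'H') := by
        rw [List.filter_cons, if_pos (by simpa using he)]
      have hcast : (Int.ofNat (k + 1)) = Int.ofNat k + 1 := by simp
      rw [List.foldl_cons, hstep, ih _ (k + 1), hfil, PySem.List.enumerate_cons,
        List.map_cons, hcast]
      simp
    · have he' : ¬ PySem.List.pyGet? e.1.toList 0 = some 'H' := by simpa using he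
      have hstep : hmStep bs (acc, k % bs.length) e = (acc, k % bs.length) := by
        simp [hmStep, he']
      have hfil : (e :: cs).filter (fun entry => PySem.Str.pyGet? entry.1 0 == some 'H') =
          cs.filter (fun entry => PySem.Str.pyGet? entry.1 0 == some 'H') := by
        rw [List.filter_cons, if_neg (by simpa using he)]
      rw [List.foldl_cons, hstep, ih acc k, hfil]

-- When no entry is a host, A's fold leaves the state untouched.
lemma hmStep_no_host (bs : List String) :
    ∀ (conns : List (String × String × String)) (st : List (String × String × String) × Nat),
      (∀ e ∈ conns, ¬ (PySem.Str.pyGet? e.1 0 = some 'H')) →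
      conns.foldl (hmStep bs) st = st := by
  intro conns
  induction conns with
  | nil => intro st _; rfl
  | cons e cs ih =>
    intro st h
    have he' : ¬ PySem.List.pyGet? e.1.toList 0 = some 'H' := by
      simpa using h e (List.mem_cons_self)
    rw [List.foldl_cons]
    have hstep : hmStep bs st e = st := by simp [hmStep, he']
    rw [hstep]
    exact ih st (fun x hx => h x (List.mem_cons_of_mem _ hx))

-- The tiled list (reps copies of bs) reads bs cyclically.
lemma flatten_replicate_getElem (bs : List String) (hbs : 0 < bs.length) :
    ∀ (reps i : Nat) (h : i < ((List.replicate reps bs).flatten).length),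
      ((List.replicate reps bs).flatten)[i] = bs[i % bs.length]'(Nat.mod_lt i hbs) := by
  intro reps
  induction reps with
  | zero => intro i h; simp at h
  | succ r ih =>
    intro i h
    simp only [List.replicate_succ, List.flatten_cons] at h ⊢
    by_cases hi : i < bs.length
    · rw [List.getElem_append_left hi]
      congr 1
      exact (Nat.mod_eq_of_lt hi).symm
    · have hge : bs.length ≤ i := Nat.le_of_not_lt hi
      have h' : i - bs.length < ((List.replicate r bs).flatten).length := by
        rw [List.length_append] at h; omega
      rw [List.getElem_append_right hge, ih (i - bs.length) h']
      congr 1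
      exact (Nat.mod_eq_sub_mod hge).symm

lemma flatten_replicate_length (bs : List String) (reps : Nat) :
    ((List.replicate reps bs).flatten).length = reps * bs.length := by
  induction reps with
  | zero => simp
  | succ r ih => rw [List.replicate_succ, List.flatten_cons, List.length_append, ih]; ring

-- The tiled bridge sequence is long enough: ceil(L/n) * n ≥ L.
lemma ceil_mul_ge (L n : Nat) (hn : 0 < n) (hL : 0 < L) : L ≤ ((L + n - 1) / n) * n := by
  have h1 := Nat.div_add_mod (L + n - 1) n
  have h2 := Nat.mod_lt (L + n - 1) hn
  rw [Nat.mul_comm]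
  omega

-- B in enumerate-mod form: zip-with-tile equals the enumerate map when bs ≠ [].
lemma alt_eq_enumerate (connections : List (String × String × String)) (bs : List String) (nt : Int) (hbs : bs ≠ []) :
    host_mapping_alt connections (some bs) nt =
      (PySem.List.enumerate (connections.filter (fun entry => PySem.Str.pyGet? entry.1 0 == some 'H')) 0).map
        (fun p => (p.2.1, p.2.2.2, PySem.List.pyGetD bs (PySem.Int.mod p.1 (Int.ofNat bs.length)) "")) := by
  have hlen : 0 < bs.length := List.length_pos_iff.mpr hbs
  simp only [host_mapping_alt, Option.getD_some]
  set hosts := connections.filter (fun e => PySem.Str.pyGet? e.1 0 == some 'H') with hh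
  by_cases hho : hosts = []
  · simp [hho, PySem.List.enumerate_nil]
  · rw [if_pos hho]
    -- reps as a natural number
    have hL : 0 < hosts.length := List.length_pos_iff.mpr hho
    have hcast : (Int.ofNat hosts.length + Int.ofNat bs.length - 1) =
        ((hosts.length + bs.length - 1 : Nat) : Int) := by
      simp only [Int.ofNat_eq_natCast]; omega
    have hfd : PySem.Int.floordiv (Int.ofNat hosts.length + Int.ofNat bs.length - 1) (Int.ofNat bs.length) =
        (((hosts.length + bs.length - 1) / bs.length : Nat) : Int) := by
      rw [hcast]; exact PySem.Int.floordiv_natCast _ _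
    rw [hfd]
    set reps : Nat := (hosts.length + bs.length - 1) / bs.length with hr
    have htn : ((reps : Int)).toNat = reps := Int.toNat_natCast reps
    rw [htn]
    have htlen : ((List.replicate reps bs).flatten).length = reps * bs.length :=
      flatten_replicate_length bs reps
    have hge : hosts.length ≤ reps * bs.length := by
      have := ceil_mul_ge hosts.length bs.length hlen hL
      omega
    apply List.ext_getElem
    · simp [htlen, PySem.List.length_enumerate]; omega
    · intro i h1 h2
      have hi : i < hosts.length := by
        simpa [List.length_zip, htlen] using h2
      have hti : i < ((List.replicate reps bs).flatten).length := by omega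
      rw [List.getElem_map, List.getElem_map, List.getElem_zip,
        PySem.List.getElem_enumerate, flatten_replicate_getElem bs hlen reps i hti]
      have hmz : PySem.Int.mod ((0 : Int) + (i : Nat)) (Int.ofNat bs.length) =
          ((i % bs.length : Nat) : Int) := by
        rw [zero_add]
        exact PySem.Int.mod_natCast i bs.length
      simp only [hmz]
      rw [PySem.List.pyGetD_natCast]
      simp [List.getD_eq_getElem?_getD, List.getElem?_eq_getElem (Nat.mod_lt i hlen)]

-- ===== VERDICT (by name: the statement is the Claim_ definition above) =====
theorem host_mapping_spec : Claim_equal_host_mapping := by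
  intro connections bridges_list number_of_tenants _ hpre
  obtain ⟨hnone, _, hbr⟩ := hpre
  obtain ⟨bs, rfl⟩ : ∃ bs, bridges_list = some bs := by
    cases bridges_list with
    | none => exact absurd rfl hnone
    | some bs => exact ⟨bs, rfl⟩
  show host_mapping _ _ _ = host_mapping_alt _ _ _
  by_cases hbs : bs = []
  · subst hbs
    rcases hbr with h | h
    · exact absurd rfl h
    · rw [host_mapping_eq_fold, hmStep_no_host [] connections ([], 0) h]
      -- with bs = [] the tiled bridge sequence is empty, so zip gives [] on B's side too
      simp [host_mapping_alt]
  · rw [host_mapping_eq_fold]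
    rw [show (([], 0) : List (String × String × String) × Nat) = ([], 0 % bs.length) by rw [Nat.zero_mod]]
    rw [hmStep_invariant bs hbs connections [] 0]
    rw [alt_eq_enumerate connections bs number_of_tenants hbs]
    simp
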